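-- pv_equiv track=rewrite | github.com/SciortinoR/COMP472 | Assignment3/main.py | count_prime_multiple_moves
-- ===== SOURCE A (Python) =====
-- def count_prime_multiple_moves(token_number, taken_token_list, prime_number):
--     legal_move_list = []
--     prime_multiple = 1
--     current_token = prime_multiple * prime_number
--
--     while current_token <= token_number:
--         if current_token not in taken_token_list:
--             legal_move_list.append(current_token)
--
--         prime_multiple += 1
--         current_token = prime_multiple * prime_number
--     return len(legal_move_list)
-- ===== SOURCE B (Python) =====
-- def count_prime_multiple_moves(token_number, taken_token_list, prime_number):
--     total = max(token_number // prime_number, 0)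
--     excluded = {t for t in taken_token_list
--                 if prime_number <= t <= token_number and t % prime_number == 0}
--     return total - len(excluded)
-- ===== Notes on version B (the rewrite author's own statement) =====
-- stated objective: alternative
-- what changed: Replaces A's enumeration of every multiple of prime_number (each tested for membership by a scan of taken_token_list) with the closed form token_number // prime_number clamped at 0, minus the size of a set of taken tokens that are in-range multiples, built in one pass over the list.
-- outside the precondition, e.g. on count_prime_multiple_moves(-5, [], -2): A returns 0, B returns 2; on count_prime_multiple_moves(5, [], 0): A does not finish within the time limit, B raises ZeroDivisionError
import Mathlib
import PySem

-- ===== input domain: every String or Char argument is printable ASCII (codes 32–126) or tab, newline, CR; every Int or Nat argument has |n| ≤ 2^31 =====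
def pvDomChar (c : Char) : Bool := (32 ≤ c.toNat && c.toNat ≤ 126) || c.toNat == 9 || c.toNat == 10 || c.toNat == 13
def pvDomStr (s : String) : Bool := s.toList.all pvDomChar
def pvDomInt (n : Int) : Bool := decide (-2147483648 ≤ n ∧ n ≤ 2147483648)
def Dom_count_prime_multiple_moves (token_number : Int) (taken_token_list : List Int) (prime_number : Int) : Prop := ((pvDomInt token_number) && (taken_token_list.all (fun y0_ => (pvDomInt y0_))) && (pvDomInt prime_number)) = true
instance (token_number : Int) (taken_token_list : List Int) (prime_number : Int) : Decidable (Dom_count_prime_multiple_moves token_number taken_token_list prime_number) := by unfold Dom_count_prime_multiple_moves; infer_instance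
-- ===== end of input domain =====

-- B replaces A's scan over every multiple (with a linear membership test each) by a
-- floor-division closed form minus the size of a set built in one pass over the taken list.

-- ===== PORT A =====
-- A's while loop: prime_multiple counts up from 1, appending untaken multiples.
-- The '0 < prime_number' conjunct is a totality guard only (Python diverges there; outside Pre_).
def pvALoop (token_number prime_number : Int) (taken_token_list : List Int)
    (prime_multiple : Int) (legal_move_list : List Int) : List Int :=
  if h : 0 < prime_number ∧ prime_multiple * prime_number ≤ token_number then
    pvALoop token_number prime_number taken_token_list (prime_multiple + 1)
      (if prime_multiple * prime_number ∈ taken_token_list then legal_move_list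
       else legal_move_list ++ [prime_multiple * prime_number])
  else legal_move_list
termination_by (token_number + prime_number - prime_multiple * prime_number).toNat
decreasing_by
  obtain ⟨hp, hk⟩ := h
  have h1 : (prime_multiple + 1) * prime_number = prime_multiple * prime_number + prime_number := by ring
  rw [h1]
  generalize prime_multiple * prime_number = m at hk ⊢
  omega

def count_prime_multiple_moves (token_number : Int) (taken_token_list : List Int) (prime_number : Int) : Int :=
  ((pvALoop token_number prime_number taken_token_list 1 []).length : Int)

-- ===== PORT B =====
def count_prime_multiple_moves_alt (token_number : Int) (taken_token_list : List Int) (prime_number : Int) : Int :=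
  let total := max (PySem.Int.floordiv token_number prime_number) 0
  let excluded : PySem.Set Int := PySem.Set.ofList (taken_token_list.filter
    (fun t => decide (prime_number ≤ t) && decide (t ≤ token_number) && (PySem.Int.mod t prime_number == 0)))
  total - PySem.Set.len excluded

-- ===== PRECONDITION & SPEC =====
-- Pre_ excludes nonpositive prime_number: there Python A diverges whenever prime_number ≤ token_number,
-- and returns a vacuous 0 otherwise, while B divides by prime_number (raising on 0); the function's
-- contract ("a prime number") never admits such inputs.
def Pre_count_prime_multiple_moves (token_number : Int) (taken_token_list : List Int) (prime_number : Int) : Prop :=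
  0 < prime_number
instance (token_number : Int) (taken_token_list : List Int) (prime_number : Int) : Decidable (Pre_count_prime_multiple_moves token_number taken_token_list prime_number) := by unfold Pre_count_prime_multiple_moves; infer_instance

def pvWitness_count_prime_multiple_moves : Int × List Int × Int := (10, [2, 4, 7], 2)

def Spec_count_prime_multiple_moves (token_number : Int) (taken_token_list : List Int) (prime_number : Int) (out : Int) : Prop := out = count_prime_multiple_moves_alt token_number taken_token_list prime_number
instance (token_number : Int) (taken_token_list : List Int) (prime_number : Int) (out : Int) : Decidable (Spec_count_prime_multiple_moves token_number taken_token_list prime_number out) := by unfold Spec_count_prime_multiple_moves; infer_instance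

-- ===== CLAIM (what is proved, stated in full; the proofs are below) =====
def Claim_equal_count_prime_multiple_moves : Prop := ∀ (token_number : Int) (taken_token_list : List Int) (prime_number : Int), Dom_count_prime_multiple_moves token_number taken_token_list prime_number → Pre_count_prime_multiple_moves token_number taken_token_list prime_number → Spec_count_prime_multiple_moves token_number taken_token_list prime_number (count_prime_multiple_moves token_number taken_token_list prime_number)

-- ===== LEMMAS AND PROOFS =====

-- A's loop counts the m in [k, n//p] with m*p untaken.
lemma pvALoop_length (n p : Int) (taken : List Int) (hp : 0 < p) (k : Int) (acc : List Int) :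
    (pvALoop n p taken k acc).length
      = acc.length
        + ((Finset.Icc k (PySem.Int.floordiv n p)).filter (fun m => m * p ∉ taken)).card := by
  rw [pvALoop]
  by_cases hk : k * p ≤ n
  · rw [dif_pos ⟨hp, hk⟩, pvALoop_length n p taken hp (k + 1)]
    have hkq : k ≤ PySem.Int.floordiv n p := (PySem.Int.le_floordiv_iff_mul_le hp).mpr hk
    rw [← Finset.insert_Icc_add_one_left_eq_Icc hkq, Finset.filter_insert]
    by_cases hmem : k * p ∈ taken
    · simp [hmem]
    · have hknot : k ∉ Finset.Icc (k + 1) (PySem.Int.floordiv n p) := by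
        simp [Finset.mem_Icc]
      rw [if_pos hmem, Finset.card_insert_of_notMem (fun hc => hknot (Finset.mem_filter.mp hc).1)]
      simp [hmem]
      omega
  · rw [dif_neg (by tauto)]
    have hq : Finset.Icc k (PySem.Int.floordiv n p) = ∅ := by
      apply Finset.Icc_eq_empty_iff.mpr
      intro hle
      exact hk ((PySem.Int.le_floordiv_iff_mul_le hp).mp hle)
    simp [hq]
termination_by (n + p - k * p).toNat
decreasing_by
  have h1 : (k + 1) * p = k * p + p := by ring
  rw [h1]
  generalize k * p = m at hk ⊢
  omega

lemma pvSetLen_ofList_eq_toFinset_card (l : List Int) :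
    PySem.Set.len (PySem.Set.ofList l) = (l.toFinset.card : Int) := by
  have h1 : (PySem.Set.ofList l).toFinset = l.toFinset := by
    ext x; simp [PySem.Set.mem_ofList]
  have h2 := List.toFinset_card_of_nodup (PySem.Set.nodup_ofList l)
  rw [h1] at h2
  simp [PySem.Set.len, ← h2]

theorem count_prime_multiple_moves_spec : Claim_equal_count_prime_multiple_moves := by
  intro n taken p _ hp
  have hp : (0:Int) < p := hp
  unfold Spec_count_prime_multiple_moves count_prime_multiple_moves count_prime_multiple_moves_alt
  rw [pvALoop_length n p taken hp 1 []]
  show _ = max (PySem.Int.floordiv n p) 0 - PySem.Set.len (PySem.Set.ofList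
    (taken.filter (fun t => decide (p ≤ t) && decide (t ≤ n) && (PySem.Int.mod t p == 0))))
  rw [pvSetLen_ofList_eq_toFinset_card]
  set q := PySem.Int.floordiv n p with hq
  -- the filtered taken list is the image of the taken multiples in [1, q]
  have himg :
      (taken.filter (fun t => decide (p ≤ t) && decide (t ≤ n) && (PySem.Int.mod t p == 0))).toFinset
        = ((Finset.Icc 1 q).filter (fun m => m * p ∈ taken)).image (fun m => m * p) := by
    ext c
    simp only [List.mem_toFinset, List.mem_filter, Finset.mem_image, Finset.mem_filter,
      Finset.mem_Icc, Bool.and_eq_true, decide_eq_true_eq, beq_iff_eq]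
    constructor
    · rintro ⟨hct, ⟨hpc, hcn⟩, hmod⟩
      obtain ⟨m, rfl⟩ := (PySem.Int.mod_eq_zero_iff_dvd _ _).mp hmod
      refine ⟨m, ⟨⟨?_, ?_⟩, by rwa [mul_comm] at hct⟩, mul_comm m p⟩
      · exact (le_mul_iff_one_le_right hp).mp hpc
      · exact (PySem.Int.le_floordiv_iff_mul_le hp).mpr (by rwa [mul_comm p m] at hcn)
    · rintro ⟨m, ⟨⟨h1m, hmq⟩, hmt⟩, rfl⟩
      refine ⟨hmt, ⟨?_, (PySem.Int.le_floordiv_iff_mul_le hp).mp hmq⟩, ?_⟩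
      · nlinarith
      · exact (PySem.Int.mod_eq_zero_iff_dvd _ _).mpr ⟨m, mul_comm m p⟩
  rw [himg, Finset.card_image_of_injective _ (fun a b h => mul_right_cancel₀ hp.ne' h)]
  have hsplit := Finset.card_filter_add_card_filter_not
    (s := Finset.Icc (1:Int) q) (fun m => m * p ∈ taken)
  have hcard : (Finset.Icc (1:Int) q).card = q.toNat := by
    rw [Int.card_Icc]; congr 1; omega
  have hmax : (q.toNat : Int) = max q 0 := Int.toNat_eq_max q
  simp only [List.length_nil, zero_add]
  omega
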